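-- pv_equiv track=rewrite | github.com/paul-heyse/CodeAnatomy | src/datafusion_engine/session/runtime_udf.py | _merge_signature_errors
-- ===== SOURCE A (Python) =====
-- from collections.abc import Callable, Mapping, Sequence
--
-- def _merge_signature_errors(
--     counts: Mapping[str, Sequence[str]],
--     types: Mapping[str, Sequence[str]],
-- ) -> dict[str, list[str]] | None:
--     merged: dict[str, list[str]] = {}
--     for errors in (counts, types):
--         for key, values in errors.items():
--             if values:
--                 merged.setdefault(key, []).extend(values)
--     if not merged:
--         return None
--     return merged
-- ===== SOURCE B (Python) =====
-- def _merge_signature_errors(counts, types):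
--     keys1 = [k for k, v in counts.items() if v]
--     keys2 = [k for k, v in types.items() if v and not counts.get(k)]
--     merged = {
--         k: list(counts.get(k, [])) + list(types.get(k, []))
--         for k in keys1 + keys2
--     }
--     return merged or None
-- ===== Notes on version B (the rewrite author's own statement) =====
-- stated objective: simpler
-- what changed: Replaces A's two streaming setdefault/extend accumulation passes over both mappings by an index-the-keys-then-compute decomposition: first build the ordered list of result keys (non-empty count keys, then non-empty type keys with no non-empty count entry), then one comprehension computing each value directly as counts.get(k, []) + types.get(k, []).
import Mathlib
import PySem

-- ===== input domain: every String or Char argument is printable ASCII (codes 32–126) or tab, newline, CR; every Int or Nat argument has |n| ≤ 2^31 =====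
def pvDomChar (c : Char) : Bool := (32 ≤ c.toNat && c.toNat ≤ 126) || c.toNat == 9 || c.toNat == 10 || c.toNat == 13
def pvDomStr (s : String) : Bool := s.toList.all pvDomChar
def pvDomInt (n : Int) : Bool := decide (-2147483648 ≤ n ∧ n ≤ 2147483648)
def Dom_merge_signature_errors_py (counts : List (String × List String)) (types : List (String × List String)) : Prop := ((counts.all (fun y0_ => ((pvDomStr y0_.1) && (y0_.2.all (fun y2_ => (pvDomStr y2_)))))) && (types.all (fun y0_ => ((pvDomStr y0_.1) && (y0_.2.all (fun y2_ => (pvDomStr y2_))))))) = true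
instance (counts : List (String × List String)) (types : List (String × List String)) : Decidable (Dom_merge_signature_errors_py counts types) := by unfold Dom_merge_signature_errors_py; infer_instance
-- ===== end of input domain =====

-- B replaces A's two streaming setdefault/extend accumulation passes by an index-the-keys-then-compute
-- decomposition (ordered key lists, then one value lookup per key); objective: simpler, same cost.

-- ===== PORT A =====
-- one loop body: `if values: merged.setdefault(key, []).extend(values)`
def pvAStep (d : PySem.Dict String (List String)) (p : String × List String) : PySem.Dict String (List String) :=
  if p.2 ≠ [] then d.modify p.1 [] (· ++ p.2) else d

def merge_signature_errors_py (counts : List (String × List String)) (types : List (String × List String)) : Option (List (String × List String)) :=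
  let merged := types.foldl pvAStep (counts.foldl pvAStep PySem.Dict.empty)
  if merged.items.isEmpty then none else some merged.items

-- ===== PORT B =====
def merge_signature_errors_py_alt (counts : List (String × List String)) (types : List (String × List String)) : Option (List (String × List String)) :=
  let keys1 := (counts.filter (fun p => !p.2.isEmpty)).map Prod.fst
  let cd := PySem.Dict.mk counts
  let td := PySem.Dict.mk types
  let keys2 := (types.filter (fun p => !p.2.isEmpty && (cd.getD p.1 []).isEmpty)).map Prod.fst
  let merged := (keys1 ++ keys2).map (fun k => (k, cd.getD k [] ++ td.getD k []))
  if merged.isEmpty then none else some merged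

-- ===== PRECONDITION & SPEC =====
-- Pre_ excludes association lists with duplicate keys: the Python arguments are Mappings (dicts), which a
-- duplicate-keyed list does not encode, so such lists are not valid inputs under the list-for-dict convention.
def Pre_merge_signature_errors_py (counts : List (String × List String)) (types : List (String × List String)) : Prop :=
  (counts.map Prod.fst).Nodup ∧ (types.map Prod.fst).Nodup
instance (counts : List (String × List String)) (types : List (String × List String)) : Decidable (Pre_merge_signature_errors_py counts types) := by unfold Pre_merge_signature_errors_py; infer_instance

def pvWitness_merge_signature_errors_py : (List (String × List String)) × (List (String × List String)) :=
  ([("a", ["x"]), ("b", [])], [("b", ["y"]), ("c", ["z"])])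

def Spec_merge_signature_errors_py (counts : List (String × List String)) (types : List (String × List String)) (out : Option (List (String × List String))) : Prop := out = merge_signature_errors_py_alt counts types
instance (counts : List (String × List String)) (types : List (String × List String)) (out : Option (List (String × List String))) : Decidable (Spec_merge_signature_errors_py counts types out) := by unfold Spec_merge_signature_errors_py; infer_instance

-- ===== CLAIM (what is proved, stated in full; the proofs are below) =====
def Claim_equal_merge_signature_errors_py : Prop := ∀ (counts : List (String × List String)) (types : List (String × List String)), Dom_merge_signature_errors_py counts types → Pre_merge_signature_errors_py counts types → Spec_merge_signature_errors_py counts types (merge_signature_errors_py counts types)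

-- ===== LEMMAS AND PROOFS =====

-- getD of the fold: value of key k = initial value ++ all values carried by k in l
theorem pvGetD_fold (l : List (String × List String)) (d : PySem.Dict String (List String)) (k : String) :
    (l.foldl pvAStep d).getD k [] = d.getD k [] ++ (l.filter (fun p => p.1 == k)).flatMap Prod.snd := by
  induction l generalizing d with
  | nil => simp
  | cons p t ih =>
    simp only [List.foldl_cons, ih, List.filter_cons]
    by_cases hp : p.2 = []
    · simp [pvAStep, hp]
      by_cases hk : p.1 = k <;> simp [hk, hp]
    · simp only [pvAStep, if_pos (by exact hp)]
      by_cases hk : p.1 = k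
      · subst hk
        simp [List.append_assoc]
      · rw [PySem.Dict.getD_modify]
        simp [hk, Ne.symm hk]

-- keys of the fold: initial keys updated with the keys of the non-empty-valued entries
theorem pvKeys_fold (l : List (String × List String)) (d : PySem.Dict String (List String)) :
    (l.foldl pvAStep d).keys = PySem.Set.update d.keys ((l.filter (fun p => !p.2.isEmpty)).map Prod.fst) := by
  induction l generalizing d with
  | nil => simp [PySem.Set.update]
  | cons p t ih =>
    simp only [List.foldl_cons, ih, List.filter_cons]
    by_cases hp : p.2 = []
    · simp [pvAStep, hp]
    · have hpe : p.2.isEmpty = false := by simp [hp]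
      simp only [pvAStep, if_pos (by exact hp), hpe, Bool.not_false]
      have hadd : (d.modify p.1 [] (· ++ p.2)).keys = PySem.Set.add d.keys p.1 := by
        by_cases hc : p.1 ∈ d.keys
        · rw [PySem.Dict.modify, PySem.Dict.keys_insert_of_contains _ _ ((PySem.Dict.contains_iff_mem_keys d p.1).mpr hc)]
          simp [PySem.Set.add, hc]
        · rw [PySem.Dict.modify, PySem.Dict.keys_insert_of_not_contains _ _ (by
            simp [PySem.Dict.contains_eq_decide_mem_keys, hc])]
          simp [PySem.Set.add, hc]
      rw [hadd]
      rfl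

-- Set.update on a duplicate-free list appends the fresh elements
theorem pvSet_update_eq (s : List String) (xs : List String) (h : xs.Nodup) :
    PySem.Set.update s xs = s ++ xs.filter (fun x => !s.contains x) := by
  induction xs generalizing s with
  | nil => simp [PySem.Set.update]
  | cons x t ih =>
    have hstep : PySem.Set.update s (x :: t) = PySem.Set.update (PySem.Set.add s x) t := rfl
    rw [hstep, ih _ (List.nodup_cons.mp h).2, List.filter_cons]
    by_cases hc : x ∈ s
    · have hsc : PySem.Set.add s x = s := by simp [PySem.Set.add, hc]
      rw [hsc]
      simp [hc]
    · have hx : x ∉ t := (List.nodup_cons.mp h).1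
      have hsc : PySem.Set.add s x = s ++ [x] := by simp [PySem.Set.add, hc]
      rw [hsc]
      have hcx : (!s.contains x) = true := by simp [hc]
      rw [hcx, if_pos rfl, List.append_assoc, List.singleton_append]
      congr 2
      apply List.filter_congr
      intro y hy
      have hyx : y ≠ x := fun hyx => hx (hyx ▸ hy)
      simp [hyx]

-- first-match lookup of a duplicate-free association list = concatenation of its matching values
theorem pvLookup_nodup (l : List (String × List String)) (k : String) (h : (l.map Prod.fst).Nodup) :
    (l.filter (fun p => p.1 == k)).flatMap Prod.snd = (PySem.Dict.mk l).getD k [] := by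
  induction l with
  | nil => simp [PySem.Dict.getD_eq_get?_getD, PySem.Dict.get?]
  | cons p t ih =>
    rw [List.filter_cons, PySem.Dict.getD_eq_get?_getD, PySem.Dict.get?_mk_cons]
    by_cases hk : p.1 = k
    · have hb : (p.1 == k) = true := by simp [hk]
      simp only [hb]
      have hft : t.filter (fun q => q.1 == k) = [] := by
        rw [List.filter_eq_nil_iff]
        intro q hq
        simp only [beq_iff_eq]
        intro hqk
        have hmem : k ∈ t.map Prod.fst := List.mem_map.mpr ⟨q, hq, hqk⟩
        rw [List.map_cons, List.nodup_cons] at h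
        exact h.1 (hk ▸ hmem)
      simp [hft]
    · have hb : (p.1 == k) = false := by simp [hk]
      simp only [hb, Bool.false_eq_true, if_false]
      rw [ih (by rw [List.map_cons, List.nodup_cons] at h; exact h.2)]
      rw [PySem.Dict.getD_eq_get?_getD]

-- a dict with duplicate-free keys is determined by its keys and getD
theorem pvItems_eq_map_keys (d : PySem.Dict String (List String)) (h : d.keys.Nodup) :
    d.items = d.keys.map (fun k => (k, d.getD k [])) := by
  have hkeys : d.keys = d.items.map Prod.fst := rfl
  rw [hkeys, List.map_map]
  conv_lhs => rw [(List.map_id d.items).symm]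
  apply List.map_congr_left
  intro p hp
  have hg := PySem.Dict.getD_of_mem_items d (k := p.1) (v := p.2) (by simpa using hp) h []
  simp [Function.comp, hg]

-- a filtered projection of a duplicate-free key list is duplicate-free
theorem pvNodup_filter_map (l : List (String × List String)) (P : String × List String → Bool)
    (h : (l.map Prod.fst).Nodup) : ((l.filter P).map Prod.fst).Nodup :=
  List.Nodup.sublist (List.Sublist.map Prod.fst List.filter_sublist) h

-- `not counts.get(k)` in B is the same test as `k not in keys1`
theorem pvIsEmpty_lookup (counts : List (String × List String)) (k : String) :
    ((counts.filter (fun p => p.1 == k)).flatMap Prod.snd).isEmpty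
      = !(((counts.filter (fun p => !p.2.isEmpty)).map Prod.fst).contains k) := by
  rw [Bool.eq_iff_iff]
  simp only [List.isEmpty_iff, List.flatMap_eq_nil_iff, List.mem_filter, List.mem_map,
    List.contains_eq_mem, decide_eq_false_iff_not, beq_iff_eq,
    Bool.not_eq_eq_eq_not, Bool.not_true, List.isEmpty_eq_false_iff]
  constructor
  · rintro h ⟨p, ⟨hp, hpne⟩, rfl⟩
    exact hpne (h p ⟨hp, rfl⟩)
  · intro h p ⟨hp, rfl⟩
    by_contra hne
    exact h ⟨p, ⟨hp, hne⟩, rfl⟩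

-- ===== VERDICT (by name: the statement is the Claim_ definition above) =====
theorem merge_signature_errors_py_spec : Claim_equal_merge_signature_errors_py := by
  intro counts types _ hpre
  obtain ⟨hc, ht⟩ := hpre
  unfold Spec_merge_signature_errors_py merge_signature_errors_py merge_signature_errors_py_alt
  set keys1 := (counts.filter (fun p => !p.2.isEmpty)).map Prod.fst with hk1
  set keys2 := (types.filter (fun p => !p.2.isEmpty && ((PySem.Dict.mk counts).getD p.1 []).isEmpty)).map Prod.fst with hk2
  set mA := types.foldl pvAStep (counts.foldl pvAStep PySem.Dict.empty) with hmA
  have hck1 : keys1.Nodup := pvNodup_filter_map _ _ hc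
  have hk2eq : keys2 = (types.filter (fun p => !p.2.isEmpty && !(keys1.contains p.1))).map Prod.fst := by
    rw [hk2]
    congr 1
    apply List.filter_congr
    intro p _
    rw [← pvLookup_nodup counts p.1 hc, pvIsEmpty_lookup, hk1]
  have htk1 : ((types.filter (fun p => !p.2.isEmpty)).map Prod.fst).Nodup := pvNodup_filter_map _ _ ht
  have hkeys : mA.keys = keys1 ++ keys2 := by
    rw [hmA, pvKeys_fold, pvKeys_fold, PySem.Dict.keys_empty]
    rw [pvSet_update_eq _ _ hck1, pvSet_update_eq _ _ htk1]
    rw [List.nil_append]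
    have h0 : List.filter (fun x => ! (([] : List String).contains x)) keys1 = keys1 := by simp
    rw [h0]
    have hfilt : ((types.filter (fun p => !p.2.isEmpty)).map Prod.fst).filter (fun x => !keys1.contains x) = keys2 := by
      rw [List.filter_map, hk2eq]
      congr 1
      rw [List.filter_filter]
      apply List.filter_congr
      intro p _
      simp [Function.comp, Bool.and_comm]
    rw [hfilt]
  have hnodup : mA.keys.Nodup := by
    rw [hkeys]
    refine List.Nodup.append hck1 (pvNodup_filter_map _ _ ht) ?_
    intro x hx1 hx2
    rw [hk2eq, List.mem_map] at hx2
    obtain ⟨p, hp, hpx⟩ := hx2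
    rw [List.mem_filter] at hp
    have hand := hp.2
    rw [Bool.and_eq_true] at hand
    have hnc : (keys1.contains p.1) = false := by
      cases hcc : keys1.contains p.1 <;> simp_all
    rw [hpx] at hnc
    simp only [List.contains_eq_mem, decide_eq_false_iff_not] at hnc
    exact absurd hx1 hnc
  have hval : ∀ k, mA.getD k [] = (PySem.Dict.mk counts).getD k [] ++ (PySem.Dict.mk types).getD k [] := by
    intro k
    rw [hmA, pvGetD_fold, pvGetD_fold]
    have hemp : (PySem.Dict.empty : PySem.Dict String (List String)).getD k [] = [] := by
      simp
    rw [hemp, List.nil_append, pvLookup_nodup counts k hc, pvLookup_nodup types k ht]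
  have hitems : mA.items = (keys1 ++ keys2).map (fun k => (k, (PySem.Dict.mk counts).getD k [] ++ (PySem.Dict.mk types).getD k [])) := by
    rw [pvItems_eq_map_keys mA hnodup, hkeys]
    apply List.map_congr_left
    intro k _
    rw [hval]
  simp only [hitems]
  rw [← hk2]
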